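-- pv_equiv track=rewrite | github.com/Sid-Nuthi101/pirateseye | lambda_functions/updateManifest.py | replace_article
-- ===== SOURCE A (Python) =====
-- def replace_article(json_obj, new_article,old_article):
--   article_prev = {}
--   article_post = {}
--   for i in json_obj.keys():
--       if(i != old_article):
--           article_prev[i] = json_obj[i]
--       else:
--           break
--   article_prev.update(new_article)
--   found = False
--   for i in json_obj.keys():
--       if(found):
--           article_post[i] = json_obj[i]
--       if(i == old_article):
--           found = True
--
--   article_prev.update(article_post)
--   return article_prev
-- ===== SOURCE B (Python) =====
-- def replace_article(json_obj, new_article, old_article):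
--     items = list(json_obj.items())
--     keys = [k for k, _ in items]
--     cut = keys.index(old_article) if old_article in keys else len(items)
--     result = dict(items[:cut])
--     result.update(new_article)
--     result.update(items[cut + 1:])
--     return result
-- ===== Notes on version B (the rewrite author's own statement) =====
-- stated objective: simpler
-- what changed: B replaces A's two stateful scans (a break-loop building the prefix dict and a found-flag loop building the suffix dict) with an index lookup and two list slices: cut = position of old_article (or len), then dict(items[:cut]) updated with new_article and items[cut+1:].
import Mathlib
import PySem

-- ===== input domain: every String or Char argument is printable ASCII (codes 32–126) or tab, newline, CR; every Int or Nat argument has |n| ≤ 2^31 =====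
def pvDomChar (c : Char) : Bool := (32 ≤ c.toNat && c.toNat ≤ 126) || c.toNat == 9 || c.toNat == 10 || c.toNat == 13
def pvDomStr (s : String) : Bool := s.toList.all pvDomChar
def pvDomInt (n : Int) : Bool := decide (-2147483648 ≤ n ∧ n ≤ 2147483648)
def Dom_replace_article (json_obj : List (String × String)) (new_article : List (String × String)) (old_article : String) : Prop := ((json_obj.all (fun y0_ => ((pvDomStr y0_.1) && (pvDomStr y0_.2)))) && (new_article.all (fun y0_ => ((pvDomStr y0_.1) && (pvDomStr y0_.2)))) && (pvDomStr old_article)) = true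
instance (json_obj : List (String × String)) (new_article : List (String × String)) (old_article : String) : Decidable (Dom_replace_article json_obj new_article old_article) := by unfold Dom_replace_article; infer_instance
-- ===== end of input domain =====

-- B replaces A's two stateful scans (break-loop + found-flag loop) with an index lookup and
-- two slices; same cost, simpler decomposition. Equivalence of the return value is proved on
-- association lists with unique json_obj keys (json_obj is a Python dict).

-- ===== PORT A =====
-- first loop of A: 'for i in json_obj.keys(): if i != old: prev[i] = json_obj[i] else: break'
-- (iterating items instead of keys+lookup is exact because Pre_ makes json_obj's keys unique)
def pvPrevLoop (old : String) : List (String × String) → PySem.Dict String String → PySem.Dict String String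
  | [], d => d
  | (k, v) :: rest, d => if k ≠ old then pvPrevLoop old rest (d.insert k v) else d

-- second loop of A, threading the 'found' flag
def pvPostLoop (old : String) : List (String × String) → Bool → PySem.Dict String String → PySem.Dict String String
  | [], _, d => d
  | (k, v) :: rest, found, d =>
      let d' := if found then d.insert k v else d
      pvPostLoop old rest (found || (k == old)) d'

def replace_article (json_obj : List (String × String)) (new_article : List (String × String)) (old_article : String) : List (String × String) :=
  let article_prev := pvPrevLoop old_article json_obj PySem.Dict.empty
  let article_prev := article_prev.update new_article
  let article_post := pvPostLoop old_article json_obj false PySem.Dict.empty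
  (article_prev.update article_post.items).items

-- ===== PORT B =====
def replace_article_alt (json_obj : List (String × String)) (new_article : List (String × String)) (old_article : String) : List (String × String) :=
  let items := json_obj
  let keys := items.map Prod.fst
  let cut : Nat := if keys.contains old_article then (PySem.List.index? keys old_article).getD 0 else items.length
  let result := PySem.Dict.ofList (PySem.List.slice items none (some (cut : Int)))
  let result := result.update new_article
  let result := result.update (PySem.List.slice items (some ((cut : Int) + 1)) none)
  result.items

-- ===== PRECONDITION & SPEC =====
-- Pre_ excludes json_obj association lists with duplicate keys: json_obj is a Python dict,
-- whose keys are unique, so such lists do not represent any input A's code runs on.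
def Pre_replace_article (json_obj : List (String × String)) (new_article : List (String × String)) (old_article : String) : Prop :=
  (json_obj.map Prod.fst).Nodup
instance (json_obj : List (String × String)) (new_article : List (String × String)) (old_article : String) : Decidable (Pre_replace_article json_obj new_article old_article) := by unfold Pre_replace_article; infer_instance

def pvWitness_replace_article : (List (String × String)) × (List (String × String)) × String :=
  ([("a", "1"), ("b", "2")], [("b", "9"), ("c", "3")], "b")

def Spec_replace_article (json_obj : List (String × String)) (new_article : List (String × String)) (old_article : String) (out : List (String × String)) : Prop := out = replace_article_alt json_obj new_article old_article
instance (json_obj : List (String × String)) (new_article : List (String × String)) (old_article : String) (out : List (String × String)) : Decidable (Spec_replace_article json_obj new_article old_article out) := by unfold Spec_replace_article; infer_instance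

-- ===== CLAIM (what is proved, stated in full; the proofs are below) =====
def Claim_equal_replace_article : Prop := ∀ (json_obj : List (String × String)) (new_article : List (String × String)) (old_article : String), Dom_replace_article json_obj new_article old_article → Pre_replace_article json_obj new_article old_article → Spec_replace_article json_obj new_article old_article (replace_article json_obj new_article old_article)

-- ===== LEMMAS AND PROOFS =====

-- the list of pairs strictly after the first pair whose key is old
def pvAfter (old : String) : List (String × String) → List (String × String)
  | [] => []
  | (k, v) :: rest => if k = old then rest else pvAfter old rest

theorem pvDict_update_nil (d : PySem.Dict String String) : d.update [] = d := rfl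

theorem pvDict_update_cons (d : PySem.Dict String String) (p : String × String) (l : List (String × String)) :
    d.update (p :: l) = (d.insert p.1 p.2).update l := rfl

theorem pvPrevLoop_eq (old : String) (j : List (String × String)) :
    ∀ d, pvPrevLoop old j d = d.update (j.takeWhile (fun p => p.1 ≠ old)) := by
  induction j with
  | nil => intro d; rfl
  | cons p rest ih =>
      intro d
      obtain ⟨k, v⟩ := p
      by_cases h : k = old
      · simp [pvPrevLoop, h, List.takeWhile, pvDict_update_nil]
      · simp [pvPrevLoop, h, List.takeWhile, ih, pvDict_update_cons]

theorem pvPostLoop_true (old : String) (j : List (String × String)) :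
    ∀ d, pvPostLoop old j true d = d.update j := by
  induction j with
  | nil => intro d; rfl
  | cons p rest ih =>
      intro d
      obtain ⟨k, v⟩ := p
      simp [pvPostLoop, ih, pvDict_update_cons]

theorem pvPostLoop_false (old : String) (j : List (String × String)) :
    ∀ d, pvPostLoop old j false d = d.update (pvAfter old j) := by
  induction j with
  | nil => intro d; rfl
  | cons p rest ih =>
      intro d
      obtain ⟨k, v⟩ := p
      by_cases h : k = old
      · simp [pvPostLoop, h, pvAfter, pvPostLoop_true]
      · have hb : (k == old) = false := by simp [h]
        simp [pvPostLoop, hb, h, pvAfter, ih]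

-- B's cut index, characterised against takeWhile / pvAfter
theorem pvCut_spec (old : String) (j : List (String × String)) :
    (j.takeWhile (fun p => p.1 ≠ old) =
        j.take (if (j.map Prod.fst).contains old then (PySem.List.index? (j.map Prod.fst) old).getD 0 else j.length)) ∧
    (pvAfter old j =
        j.drop ((if (j.map Prod.fst).contains old then (PySem.List.index? (j.map Prod.fst) old).getD 0 else j.length) + 1)) := by
  induction j with
  | nil => simp [pvAfter]
  | cons p rest ih =>
      obtain ⟨k, v⟩ := p
      by_cases h : k = old
      · subst h
        rw [List.map_cons, if_pos (by simp), PySem.List.index?_cons_self]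
        constructor
        · simp [List.takeWhile]
        · simp [pvAfter]
      · by_cases hc : old ∈ rest.map Prod.fst
        · obtain ⟨c, hcidx⟩ := Option.isSome_iff_exists.mp
            ((PySem.List.index?_isSome_iff (rest.map Prod.fst) old).mpr hc)
          have ih1 := ih.1
          have ih2 := ih.2
          rw [if_pos (by simpa using hc), hcidx] at ih1 ih2
          rw [List.map_cons, if_pos (by simp [hc]),
            PySem.List.index?_cons_of_ne _ h, hcidx]
          simp only [Option.getD_some] at ih1 ih2
          constructor
          · simp only [Option.map_some, Option.getD_some]
            simp [List.takeWhile, h]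
            simpa using ih1
          · simp only [Option.map_some, Option.getD_some]
            simp [pvAfter, h]
            simpa using ih2
        · have ih1 := ih.1
          have ih2 := ih.2
          rw [if_neg (by simpa using hc)] at ih1 ih2
          rw [List.map_cons, if_neg (by simp [hc]; exact fun e => h e.symm)]
          constructor
          · simp [List.takeWhile, h]
            simpa using ih1
          · simp [pvAfter, h, ih2, List.drop_eq_nil_of_le]

-- items of a dict built from a list with unique keys is that list
theorem pvItems_ofList (l : List (String × String)) (h : (l.map Prod.fst).Nodup) :
    (PySem.Dict.ofList l).items = l := by
  have := PySem.Dict.items_foldl_insert_fresh (l := l) (k := Prod.fst) (v := Prod.snd)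
    (d := (PySem.Dict.empty : PySem.Dict String String))
    (by simp [PySem.Dict.contains_empty]) h
  simpa [PySem.Dict.ofList, PySem.Dict.update, PySem.Dict.items] using this

theorem pvOfList_eq_update_empty (l : List (String × String)) :
    PySem.Dict.ofList l = PySem.Dict.empty.update l := rfl

-- ===== VERDICT (by name: the statement is the Claim_ definition above) =====
theorem replace_article_spec : Claim_equal_replace_article := by
  intro j n old _ hpre
  unfold Spec_replace_article replace_article replace_article_alt
  simp only
  rw [pvPrevLoop_eq, pvPostLoop_false, (pvCut_spec old j).1, (pvCut_spec old j).2]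
  rw [PySem.List.slice_to_natCast]
  have hcast : ((if (j.map Prod.fst).contains old then (PySem.List.index? (j.map Prod.fst) old).getD 0 else j.length : Nat) : Int) + 1
      = (((if (j.map Prod.fst).contains old then (PySem.List.index? (j.map Prod.fst) old).getD 0 else j.length) + 1 : Nat) : Int) := by
    push_cast; ring
  rw [hcast, PySem.List.slice_from_natCast]
  have hnd : ((List.drop ((if (j.map Prod.fst).contains old then (PySem.List.index? (j.map Prod.fst) old).getD 0 else j.length) + 1) j).map Prod.fst).Nodup :=
    hpre.sublist ((List.drop_sublist _ j).map Prod.fst)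
  rw [← pvOfList_eq_update_empty, ← pvOfList_eq_update_empty, pvItems_ofList _ hnd]
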